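-- pv_equiv track=rewrite | github.com/adampann/data_compression | PA2/compressor.py | zigzagPattern
-- ===== SOURCE A (Python) =====
-- def zigzagPattern(size): #2d arrays only
-- 	m = [[0 for x in range(size)] for y in range(size)]
-- 	index = -1
-- 	for i in range(2 * (size - 1) + 1):
-- 		if i < size:
-- 			bound = 0
-- 		else:
-- 			bound = i - size + 1
-- 		for j in range(bound, i - bound + 1):
-- 			index = index + 1
-- 			if i % 2 == 1:
-- 				m[j][i - j] = index
-- 			else:
-- 				m[i - j][j] = index
-- 	return m
-- ===== SOURCE B (Python) =====
-- def zigzagPattern(size):  # 2d arrays only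
--     def cell(r, c):
--         d = r + c
--         if d < size:
--             before = d * (d + 1) // 2
--         else:
--             before = size * size - (2 * size - 1 - d) * (2 * size - d) // 2
--         if d % 2 == 0:
--             return before + min(d, size - 1) - r
--         else:
--             return before + r - max(0, d - size + 1)
--     return [[cell(r, c) for c in range(size)] for r in range(size)]
-- ===== Notes on version B (the rewrite author's own statement) =====
-- stated objective: alternative
-- what changed: B replaces A's sequential index-threading double loop over diagonals (mutating a preallocated matrix) by a closed-form formula computing each cell's zigzag index directly from its coordinates, built as a pure comprehension.
import Mathlib
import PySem

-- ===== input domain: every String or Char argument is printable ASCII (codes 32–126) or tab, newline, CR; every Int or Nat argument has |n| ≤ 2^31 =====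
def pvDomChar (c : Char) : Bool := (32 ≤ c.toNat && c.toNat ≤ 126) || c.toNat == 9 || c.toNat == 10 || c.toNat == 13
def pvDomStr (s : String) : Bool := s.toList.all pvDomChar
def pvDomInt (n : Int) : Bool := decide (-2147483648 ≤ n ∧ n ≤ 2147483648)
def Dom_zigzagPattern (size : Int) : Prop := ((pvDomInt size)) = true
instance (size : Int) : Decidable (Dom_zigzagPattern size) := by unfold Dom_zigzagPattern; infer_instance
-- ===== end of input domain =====

-- B replaces A's index-threading diagonal double-loop by a per-cell closed-form position formula (alternative decomposition).

-- ===== PORT A =====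
-- inner-loop body of A: the write 'm[j][i-j] = index' (odd i) / 'm[i-j][j] = index' (even i);
-- indices are always in range here, pySetD/pyGetD are exact under that
def zzStepA (size i : Int) (st : List (List Int) × Int) (j : Int) : List (List Int) × Int :=
  let index := st.2 + 1
  if PySem.Int.mod i 2 = 1 then
    (PySem.List.pySetD st.1 j (PySem.List.pySetD (PySem.List.pyGetD st.1 j []) (i - j) index), index)
  else
    (PySem.List.pySetD st.1 (i - j) (PySem.List.pySetD (PySem.List.pyGetD st.1 (i - j) []) j index), index)

-- outer-loop body of A: one diagonal i
def zzDiagA (size : Int) (st : List (List Int) × Int) (i : Int) : List (List Int) × Int :=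
  let bound : Int := if i < size then 0 else i - size + 1
  (PySem.List.pyRange bound (i - bound + 1) 1).foldl (zzStepA size i) st

def zigzagPattern (size : Int) : List (List Int) :=
  let m : List (List Int) :=
    (PySem.List.pyRange 0 size 1).map (fun _y =>
      (PySem.List.pyRange 0 size 1).map (fun _x => (0 : Int)))
  ((PySem.List.pyRange 0 (2 * (size - 1) + 1) 1).foldl (zzDiagA size) (m, -1)).1

-- ===== PORT B =====
-- Source B's 'cell(r, c)'
def zzCell (size r c : Int) : Int :=
  let d := r + c
  let before :=
    if d < size then PySem.Int.floordiv (d * (d + 1)) 2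
    else size * size - PySem.Int.floordiv ((2 * size - 1 - d) * (2 * size - d)) 2
  if PySem.Int.mod d 2 = 0 then before + min d (size - 1) - r
  else before + r - max 0 (d - size + 1)

def zigzagPattern_alt (size : Int) : List (List Int) :=
  (PySem.List.pyRange 0 size 1).map (fun r =>
    (PySem.List.pyRange 0 size 1).map (fun c => zzCell size r c))

-- ===== PRECONDITION & SPEC =====
def Spec_zigzagPattern (size : Int) (out : List (List Int)) : Prop := out = zigzagPattern_alt size
instance (size : Int) (out : List (List Int)) : Decidable (Spec_zigzagPattern size out) := by unfold Spec_zigzagPattern; infer_instance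

-- ===== CLAIM (what is proved, stated in full; the proofs are below) =====
def Claim_equal_zigzagPattern : Prop := ∀ (size : Int), Dom_zigzagPattern size → Spec_zigzagPattern size (zigzagPattern size)

-- ===== LEMMAS AND PROOFS =====

-- number of cells in diagonals 0..d-1 (Source B's 'before'); first row of diagonal i (A's 'bound')
def zzBefore (size d : Int) : Int :=
  if d < size then PySem.Int.floordiv (d * (d + 1)) 2
  else size * size - PySem.Int.floordiv ((2 * size - 1 - d) * (2 * size - d)) 2

def zzBound (size i : Int) : Int := if i < size then 0 else i - size + 1

-- cell (r,c) has been written after t inner steps of diagonal i (diagonals < i are complete)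
def zzW (size i t r c : Int) : Bool :=
  decide (r + c < i) ||
    (decide (r + c = i) &&
      (if i % 2 = 1 then decide (r < zzBound size i + t) else decide (i - zzBound size i - t < r)))

def zzEntry (size i t r c : Int) : Int := if zzW size i t r c then zzCell size r c else 0

def zzMat (size i t : Int) : List (List Int) :=
  (PySem.List.pyRange 0 size 1).map (fun r =>
    (PySem.List.pyRange 0 size 1).map (zzEntry size i t r))

lemma two_mul_tri (u : Int) : 2 * PySem.Int.floordiv (u * (u + 1)) 2 = u * (u + 1) := by
  rw [PySem.Int.floordiv_eq_ediv_of_pos (by norm_num)]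
  exact Int.mul_ediv_cancel' (Int.even_mul_succ_self u).two_dvd

lemma tri_succ (u : Int) :
    PySem.Int.floordiv ((u + 1) * (u + 2)) 2 = PySem.Int.floordiv (u * (u + 1)) 2 + (u + 1) := by
  have h1 := two_mul_tri u
  have h2 := two_mul_tri (u + 1)
  rw [show (u + 1) * (u + 1 + 1) = (u + 1) * (u + 2) by ring] at h2
  have e : (u + 1) * (u + 2) = u * (u + 1) + 2 * (u + 1) := by ring
  linarith

lemma zzBefore_zero (size : Int) (hs : 1 ≤ size) : zzBefore size 0 = 0 := by
  rw [zzBefore, if_pos (by omega)]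
  norm_num [PySem.Int.floordiv_eq_ediv_of_pos]

lemma zzBefore_succ (size i : Int) (hs : 1 ≤ size) (h0 : 0 ≤ i) (h2 : i ≤ 2 * size - 2) :
    zzBefore size (i + 1) = zzBefore size i + (i - 2 * zzBound size i + 1) := by
  unfold zzBefore zzBound
  by_cases h1 : i + 1 < size
  · rw [if_pos h1, if_pos (by omega : i < size), if_pos (by omega : i < size),
      show (i + 1) * (i + 1 + 1) = (i + 1) * (i + 2) by ring, tri_succ i]
    ring
  · by_cases hlt : i < size
    · have hi3 : i = size - 1 := by omega
      subst hi3
      rw [if_neg h1, if_pos hlt, if_pos hlt,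
        show (2 * size - 1 - (size - 1 + 1)) * (2 * size - (size - 1 + 1))
            = (size - 1) * (size - 1 + 1) by ring]
      have h := two_mul_tri (size - 1)
      have e : size * size = (size - 1) * (size - 1 + 1) + size := by ring
      linarith
    · rw [if_neg h1, if_neg hlt, if_neg hlt,
        show (2 * size - 1 - (i + 1)) * (2 * size - (i + 1))
            = (2 * size - 2 - i) * ((2 * size - 2 - i) + 1) by ring,
        show (2 * size - 1 - i) * (2 * size - i)
            = ((2 * size - 2 - i) + 1) * ((2 * size - 2 - i) + 2) by ring,
        tri_succ (2 * size - 2 - i)]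
      ring

-- the closed form zzCell, written via zzBefore
lemma zzCell_eq (size r c : Int) :
    zzCell size r c =
      if PySem.Int.mod (r + c) 2 = 0 then zzBefore size (r + c) + min (r + c) (size - 1) - r
      else zzBefore size (r + c) + r - max 0 (r + c - size + 1) := rfl

lemma map_pyRange_congr {α : Type} (size : Int) (F G : Int → α)
    (h : ∀ r, 0 ≤ r → r < size → F r = G r) :
    (PySem.List.pyRange 0 size 1).map F = (PySem.List.pyRange 0 size 1).map G := by
  refine List.map_congr_left fun x hx => ?_
  have := (PySem.List.mem_pyRange_one).mp hx
  exact h x this.1 this.2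

-- a single write m[r0][c0] = v into a matrix given by a pointwise function
lemma set_mat (size r0 c0 : Int) (h0r : 0 ≤ r0) (hrs : r0 < size) (h0c : 0 ≤ c0) (hcs : c0 < size)
    (f g : Int → Int → Int) (v : Int)
    (hframe : ∀ r c, 0 ≤ r → r < size → 0 ≤ c → c < size → ¬(r = r0 ∧ c = c0) → f r c = g r c)
    (hv : v = g r0 c0) :
    PySem.List.pySetD
        ((PySem.List.pyRange 0 size 1).map (fun r => (PySem.List.pyRange 0 size 1).map (f r))) r0
        (PySem.List.pySetD
          (PySem.List.pyGetD
            ((PySem.List.pyRange 0 size 1).map (fun r => (PySem.List.pyRange 0 size 1).map (f r)))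
            r0 []) c0 v)
      = (PySem.List.pyRange 0 size 1).map (fun r => (PySem.List.pyRange 0 size 1).map (g r)) := by
  rw [PySem.List.pyGetD_map_pyRange_of_nonneg _ _ _ _ h0r hrs,
    PySem.List.pySetD_of_nonneg _ _ h0c, PySem.List.pySetD_of_nonneg _ _ h0r]
  apply List.ext_getElem
  · simp [PySem.List.length_pyRange_one]
  · intro k h1 h2
    have hk2 : (k : Int) < size := by
      simp [PySem.List.length_pyRange_one] at h2; omega
    rw [List.getElem_set]
    by_cases hk : r0.toNat = k
    · rw [if_pos hk, List.getElem_map, PySem.List.getElem_pyRange_one, zero_add]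
      have hkr : (k : Int) = r0 := by omega
      apply List.ext_getElem
      · simp [PySem.List.length_pyRange_one]
      · intro m hm1 hm2
        have hm3 : (m : Int) < size := by
          simp [PySem.List.length_pyRange_one] at hm2; omega
        rw [List.getElem_set]
        by_cases hm : c0.toNat = m
        · rw [if_pos hm, List.getElem_map, PySem.List.getElem_pyRange_one, zero_add, hv, hkr]
          congr 1; omega
        · rw [if_neg hm]
          simp only [List.getElem_map, PySem.List.getElem_pyRange_one, zero_add]
          rw [hkr]
          refine hframe r0 ↑m h0r hrs (by omega) hm3 ?_
          rintro ⟨-, hb⟩; exact hm (by omega)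
    · rw [if_neg hk, List.getElem_map, List.getElem_map, PySem.List.getElem_pyRange_one, zero_add]
      apply List.map_congr_left
      intro c hc
      have hc2 := PySem.List.mem_pyRange_one.mp hc
      refine hframe ↑k c (by omega) hk2 hc2.1 hc2.2 ?_
      rintro ⟨ha, -⟩; exact hk (by omega)

lemma step_eq (size i t : Int) (hs : 1 ≤ size) (hi : 0 ≤ i) (hi2 : i ≤ 2 * size - 2)
    (ht : 0 ≤ t) (ht2 : t ≤ i - 2 * zzBound size i) :
    zzStepA size i (zzMat size i t, zzBefore size i + t - 1) (zzBound size i + t)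
      = (zzMat size i (t + 1), zzBefore size i + t) := by
  have hb1 : 0 ≤ zzBound size i := by unfold zzBound; split <;> omega
  have hb2 : i - zzBound size i < size := by unfold zzBound; split <;> omega
  have hmax : max 0 (i - size + 1) = zzBound size i := by unfold zzBound; split <;> omega
  have hmin : min i (size - 1) = i - zzBound size i := by unfold zzBound; split <;> omega
  unfold zzStepA zzMat
  by_cases hodd : PySem.Int.mod i 2 = 1
  · have hmod : i % 2 = 1 := by
      rw [← PySem.Int.mod_eq_emod_of_pos (by norm_num : (0:Int) < 2)]; exact hodd
    rw [if_pos hodd]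
    simp only [Prod.mk.injEq]
    refine ⟨?_, by ring⟩
    refine set_mat size (zzBound size i + t) (i - (zzBound size i + t)) (by omega) (by omega)
      (by omega) (by omega) _ _ _ ?_ ?_
    · intro r c h1 h2 h3 h4 h5
      unfold zzEntry zzW
      rw [hmod]
      norm_num
      simp only [show (r + c < i ∨ r + c = i ∧ r < zzBound size i + t) ↔
          (r + c < i ∨ r + c = i ∧ r < zzBound size i + (t + 1)) from by omega]
    · unfold zzEntry zzW
      rw [hmod]
      norm_num
      rw [zzCell_eq]
      have hm2 : PySem.Int.mod (zzBound size i + t + (i - (zzBound size i + t))) 2 = 1 := by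
        rw [show zzBound size i + t + (i - (zzBound size i + t)) = i from by ring]; exact hodd
      rw [if_neg (by rw [hm2]; norm_num)]
      rw [show zzBound size i + t + (i - (zzBound size i + t)) = i from by ring, hmax]
      ring
  · have hmod : i % 2 = 0 := by
      have h := PySem.Int.mod_eq_emod_of_pos (a := i) (by norm_num : (0:Int) < 2)
      rw [h] at hodd; omega
    rw [if_neg hodd]
    simp only [Prod.mk.injEq]
    refine ⟨?_, by ring⟩
    refine set_mat size (i - (zzBound size i + t)) (zzBound size i + t) (by omega) (by omega)
      (by omega) (by omega) _ _ _ ?_ ?_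
    · intro r c h1 h2 h3 h4 h5
      unfold zzEntry zzW
      rw [hmod]
      norm_num
      simp only [show (r + c < i ∨ r + c = i ∧ i - zzBound size i - t < r) ↔
          (r + c < i ∨ r + c = i ∧ i - zzBound size i - (t + 1) < r) from by omega]
    · unfold zzEntry zzW
      rw [hmod]
      norm_num
      rw [zzCell_eq]
      have hm2 : PySem.Int.mod (i - (zzBound size i + t) + (zzBound size i + t)) 2 = 0 := by
        rw [show i - (zzBound size i + t) + (zzBound size i + t) = i from by ring,
          PySem.Int.mod_eq_emod_of_pos (by norm_num : (0:Int) < 2), hmod]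
      rw [if_pos hm2]
      rw [show i - (zzBound size i + t) + (zzBound size i + t) = i from by ring, hmin]
      rw [if_pos (show i - zzBound size i - (t + 1) < i - (zzBound size i + t) from by omega)]
      ring

lemma inner_loop (size i : Int) (hs : 1 ≤ size) (hi : 0 ≤ i) (hi2 : i ≤ 2 * size - 2) :
    ∀ (rem : Nat) (t : Int), 0 ≤ t → t + rem = i - 2 * zzBound size i + 1 →
      (PySem.List.pyRange (zzBound size i + t) (i - zzBound size i + 1) 1).foldl (zzStepA size i)
          (zzMat size i t, zzBefore size i + t - 1)
        = (zzMat size i (i - 2 * zzBound size i + 1),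
            zzBefore size i + (i - 2 * zzBound size i + 1) - 1) := by
  intro rem
  induction rem with
  | zero =>
    intro t ht hsum
    have ht2 : t = i - 2 * zzBound size i + 1 := by push_cast at hsum; omega
    rw [PySem.List.pyRange_one_eq_nil (by omega : i - zzBound size i + 1 ≤ zzBound size i + t)]
    rw [ht2]
    rfl
  | succ n ih =>
    intro t ht hsum
    have hsum' : t + (n : Int) + 1 = i - 2 * zzBound size i + 1 := by push_cast at hsum; omega
    rw [PySem.List.pyRange_one_cons (by omega : zzBound size i + t < i - zzBound size i + 1)]
    rw [List.foldl_cons, step_eq size i t hs hi hi2 ht (by omega)]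
    have h := ih (t + 1) (by omega) (by push_cast; omega)
    rw [show zzBefore size i + (t + 1) - 1 = zzBefore size i + t from by ring] at h
    rw [show zzBound size i + t + 1 = zzBound size i + (t + 1) from by ring]
    exact h

lemma zzMat_full (size i : Int) (hs : 1 ≤ size) (hi : 0 ≤ i) (hi2 : i ≤ 2 * size - 2) :
    zzMat size i (i - 2 * zzBound size i + 1) = zzMat size (i + 1) 0 := by
  have hb5 : i - zzBound size i = min i (size - 1) := by unfold zzBound; split <;> omega
  have hb6 : zzBound size i = max 0 (i - size + 1) := by unfold zzBound; split <;> omega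
  have hb7 : zzBound size (i + 1) = max 0 (i - size + 2) := by unfold zzBound; split <;> omega
  have hb8 : i + 1 - zzBound size (i + 1) = min (i + 1) (size - 1) := by
    unfold zzBound; split <;> omega
  unfold zzMat
  apply map_pyRange_congr
  intro r hr1 hr2
  apply map_pyRange_congr
  intro c hc1 hc2
  unfold zzEntry zzW
  rcases (by omega : i % 2 = 0 ∨ i % 2 = 1) with h | h
  · have h2 : (i + 1) % 2 = 1 := by omega
    simp only [h, h2]
    norm_num
    exact if_congr (by omega) rfl rfl
  · have h2 : ¬((i + 1) % 2 = 1) := by omega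
    simp only [h, if_neg h2]
    norm_num
    exact if_congr (by omega) rfl rfl

lemma diag_eq (size i : Int) (hs : 1 ≤ size) (hi : 0 ≤ i) (hi2 : i ≤ 2 * size - 2) :
    zzDiagA size (zzMat size i 0, zzBefore size i - 1) i
      = (zzMat size (i + 1) 0, zzBefore size (i + 1) - 1) := by
  show (PySem.List.pyRange (if i < size then 0 else i - size + 1)
      (i - (if i < size then 0 else i - size + 1) + 1) 1).foldl (zzStepA size i)
      (zzMat size i 0, zzBefore size i - 1) = _
  rw [show (if i < size then (0:Int) else i - size + 1) = zzBound size i from rfl]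
  have h := inner_loop size i hs hi hi2 (i - 2 * zzBound size i + 1).toNat 0 le_rfl (by
    have : (0:Int) ≤ i - 2 * zzBound size i + 1 := by unfold zzBound; split <;> omega
    omega)
  simp only [add_zero] at h
  rw [h, zzMat_full size i hs hi hi2, zzBefore_succ size i hs hi hi2]

lemma outer_loop (size : Int) (hs : 1 ≤ size) :
    ∀ (k : Nat), (k : Int) ≤ 2 * size - 1 →
      (PySem.List.pyRange 0 (k : Int) 1).foldl (zzDiagA size) (zzMat size 0 0, -1)
        = (zzMat size (k : Int) 0, zzBefore size (k : Int) - 1) := by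
  intro k
  induction k with
  | zero =>
    intro _
    rw [PySem.List.pyRange_one_eq_nil (by norm_num)]
    rw [show ((0:Nat):Int) = 0 from rfl, zzBefore_zero size hs]
    norm_num
  | succ n ih =>
    intro h
    have h' : (n : Int) ≤ 2 * size - 1 := by push_cast at h ⊢; omega
    rw [show ((n + 1 : Nat) : Int) = (n : Int) + 1 from by push_cast; ring]
    rw [PySem.List.pyRange_one_succ_right (by omega : (0:Int) ≤ (n:Int)), List.foldl_append,
      ih h', List.foldl_cons, List.foldl_nil]
    exact diag_eq size n hs (by omega) (by omega)

-- ===== VERDICT (by name: the statement is the Claim_ definition above) =====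
lemma zzMat_init (size : Int) (hs : 1 ≤ size) :
    ((PySem.List.pyRange 0 size 1).map (fun _y =>
        (PySem.List.pyRange 0 size 1).map (fun _x => (0:Int))))
      = zzMat size 0 0 := by
  have hb : zzBound size 0 = 0 := by unfold zzBound; split <;> omega
  unfold zzMat
  apply map_pyRange_congr
  intro r hr1 hr2
  apply map_pyRange_congr
  intro c hc1 hc2
  unfold zzEntry zzW
  simp only [hb]
  norm_num
  intro h1
  exact absurd h1 (by omega)

lemma zzMat_final (size : Int) (hs : 1 ≤ size) :
    zzMat size (2 * size - 1) 0
      = (PySem.List.pyRange 0 size 1).map (fun r =>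
          (PySem.List.pyRange 0 size 1).map (fun c => zzCell size r c)) := by
  unfold zzMat
  apply map_pyRange_congr
  intro r hr1 hr2
  apply map_pyRange_congr
  intro c hc1 hc2
  unfold zzEntry zzW
  norm_num
  intro h1 _
  exact absurd h1 (by omega)

theorem zigzagPattern_spec : Claim_equal_zigzagPattern := by
  intro size _
  unfold Spec_zigzagPattern zigzagPattern zigzagPattern_alt
  by_cases hs : 1 ≤ size
  · rw [zzMat_init size hs]
    have hk : (((2 * size - 1).toNat : Nat) : Int) = 2 * size - 1 := by omega
    rw [show 2 * (size - 1) + 1 = (((2 * size - 1).toNat : Nat) : Int) from by omega]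
    show (List.foldl (zzDiagA size) (zzMat size 0 0, -1)
        (PySem.List.pyRange 0 (((2 * size - 1).toNat : Nat) : Int) 1)).1
      = _
    rw [outer_loop size hs (2 * size - 1).toNat (by omega)]
    show zzMat size (((2 * size - 1).toNat : Nat) : Int) 0 = _
    rw [hk, zzMat_final size hs]
  · rw [PySem.List.pyRange_one_eq_nil (by omega : size ≤ 0),
      PySem.List.pyRange_one_eq_nil (by omega : 2 * (size - 1) + 1 ≤ 0)]
    rfl
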